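-- pv_equiv track=rewrite | github.com/JoshVarty/Rosalind | 012_Overlap_Graphs.py | build_adjacency_list
-- ===== SOURCE A (Python) =====
-- def build_adjacency_list(record_lookup, k=3):
--
--     prefix_lookup = {}
--     adjacency_list = {}
--
--     # Create a lookup from prefix -> record name
--     for prefix_name, dna in record_lookup.items():
--         prefix = dna[:k]
--
--         if prefix not in prefix_lookup:
--             prefix_lookup[prefix] = []
--
--         prefix_lookup[prefix].append(prefix_name)
--
--     # Match suffixes using the prefix lookup
--     for suffix_name, dna in record_lookup.items():
--
--         suffix = dna[-k:]
--         if suffix in prefix_lookup: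
--             prefix_names = prefix_lookup[suffix]
--
--             for prefix_name in prefix_names:
--
--                 # Don't match an entry to itself
--                 if suffix_name != prefix_name:
--                     if suffix_name not in adjacency_list:
--                         adjacency_list[suffix_name] = []
--
--                     adjacency_list[suffix_name].append(prefix_name)
--
--     return adjacency_list
-- ===== SOURCE B (Python) =====
-- def build_adjacency_list(record_lookup, k=3):
--     # Naive all-pairs comparison: no prefix index, just rescan all records per record.
--     adjacency_list = {}
--     for suffix_name, dna_s in record_lookup.items():
--         for prefix_name, dna_p in record_lookup.items():
--             if suffix_name != prefix_name and dna_s[-k:] == dna_p[:k]: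
--                 if suffix_name not in adjacency_list:
--                     adjacency_list[suffix_name] = []
--                 adjacency_list[suffix_name].append(prefix_name)
--     return adjacency_list
-- ===== Notes on version B (the rewrite author's own statement) =====
-- stated objective: simpler
-- what changed: Replaced A's two-phase build of a prefix->names index followed by suffix lookups with a single naive all-pairs nested scan that compares each record's suffix to each record's prefix directly, maintaining no auxiliary table.
import Mathlib
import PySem

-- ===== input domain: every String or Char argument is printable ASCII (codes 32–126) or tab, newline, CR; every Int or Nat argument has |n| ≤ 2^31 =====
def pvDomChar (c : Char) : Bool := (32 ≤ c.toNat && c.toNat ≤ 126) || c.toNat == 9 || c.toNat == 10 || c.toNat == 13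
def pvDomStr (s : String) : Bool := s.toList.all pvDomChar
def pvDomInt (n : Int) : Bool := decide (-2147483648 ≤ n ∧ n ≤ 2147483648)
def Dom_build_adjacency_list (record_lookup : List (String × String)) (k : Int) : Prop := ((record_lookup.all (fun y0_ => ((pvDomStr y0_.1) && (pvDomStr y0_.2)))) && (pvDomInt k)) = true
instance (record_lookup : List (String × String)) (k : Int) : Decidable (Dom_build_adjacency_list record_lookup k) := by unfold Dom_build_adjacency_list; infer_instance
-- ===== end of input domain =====

-- B drops A's prefix->names index and does a naive all-pairs suffix/prefix scan (objective: simpler).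
-- ===== PORT A =====
def build_adjacency_list (record_lookup : List (String × String)) (k : Int) : List (String × List String) :=
  let items := (PySem.Dict.ofList record_lookup).items
  let prefix_lookup : PySem.Dict String (List String) :=
    items.foldl (fun d p => d.modify (PySem.Str.slice p.2 none (some k)) [] (· ++ [p.1]))
      PySem.Dict.empty
  let adjacency_list : PySem.Dict String (List String) :=
    items.foldl (fun adj p =>
      let suffix := PySem.Str.slice p.2 (some (-k)) none
      if prefix_lookup.contains suffix then
        (prefix_lookup.getD suffix []).foldl
          (fun adj prefix_name =>
            if p.1 ≠ prefix_name then adj.modify p.1 [] (· ++ [prefix_name]) else adj)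
          adj
      else adj)
      PySem.Dict.empty
  adjacency_list.items

-- ===== PORT B =====
def build_adjacency_list_alt (record_lookup : List (String × String)) (k : Int) : List (String × List String) :=
  let items := (PySem.Dict.ofList record_lookup).items
  let adjacency_list : PySem.Dict String (List String) :=
    items.foldl (fun adj p =>
      items.foldl (fun adj q =>
        if p.1 ≠ q.1 ∧ PySem.Str.slice p.2 (some (-k)) none = PySem.Str.slice q.2 none (some k)
        then adj.modify p.1 [] (· ++ [q.1]) else adj)
        adj)
      PySem.Dict.empty
  adjacency_list.items

-- ===== PRECONDITION & SPEC =====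
def Spec_build_adjacency_list (record_lookup : List (String × String)) (k : Int) (out : List (String × List String)) : Prop := out = build_adjacency_list_alt record_lookup k
instance (record_lookup : List (String × String)) (k : Int) (out : List (String × List String)) : Decidable (Spec_build_adjacency_list record_lookup k out) := by unfold Spec_build_adjacency_list; infer_instance

-- ===== CLAIM (what is proved, stated in full; the proofs are below) =====
def Claim_equal_build_adjacency_list : Prop := ∀ (record_lookup : List (String × String)) (k : Int), Dom_build_adjacency_list record_lookup k → Spec_build_adjacency_list record_lookup k (build_adjacency_list record_lookup k)

-- ===== LEMMAS AND PROOFS =====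

-- A's prefix_lookup, looked up at c, lists exactly the names of the records whose k-prefix is c, in order.
theorem pv_getD_prefix_lookup (l : List (String × String)) (k : Int) (c : String) :
    (l.foldl (fun d p => d.modify (PySem.Str.slice p.2 none (some k)) [] (· ++ [p.1]))
        (PySem.Dict.empty : PySem.Dict String (List String))).getD c []
      = (l.filter (fun q => PySem.Str.slice q.2 none (some k) == c)).map (·.1) := by
  have h := PySem.Dict.getD_foldl_modify_append
      (l := l.map (fun p => (PySem.Str.slice p.2 none (some k), p.1)))
      (d := (PySem.Dict.empty : PySem.Dict String (List String))) (c := c)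
  simpa [List.foldl_map, List.filter_map, List.map_map, Function.comp,
    PySem.Dict.getD_empty] using h

-- membership in prefix_lookup's keys = some record has that k-prefix
theorem pv_contains_prefix_lookup (l : List (String × String)) (k : Int) (c : String) :
    (l.foldl (fun d p => d.modify (PySem.Str.slice p.2 none (some k)) [] (· ++ [p.1]))
        (PySem.Dict.empty : PySem.Dict String (List String))).contains c = true
      ↔ c ∈ l.map (fun q => PySem.Str.slice q.2 none (some k)) := by
  rw [PySem.Dict.contains_iff_mem_keys,
    PySem.Dict.keys_foldl_modify_key (key := fun p : String × String => PySem.Str.slice p.2 none (some k))]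
  simp [PySem.Dict.keys_empty, PySem.Set.update_nil_left, PySem.Set.mem_ofList]

-- a guarded fold is the fold over the filtered list
theorem pv_foldl_ite {α β : Type} (l : List α) (P : α → Prop) [DecidablePred P]
    (b : α → Bool) (hb : ∀ x, b x = true ↔ P x)
    (f : β → α → β) (init : β) :
    l.foldl (fun acc x => if P x then f acc x else acc) init = (l.filter b).foldl f init := by
  induction l generalizing init with
  | nil => rfl
  | cons q t ih =>
    by_cases h : P q
    · rw [List.foldl_cons, if_pos h, List.filter_cons_of_pos ((hb q).2 h), List.foldl_cons]
      exact ih _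
    · rw [List.foldl_cons, if_neg h,
        List.filter_cons_of_neg (by simpa using fun hq => h ((hb q).1 hq))]
      exact ih _

-- the two per-record passes agree
theorem pv_step_eq (items : List (String × String)) (k : Int)
    (adj : PySem.Dict String (List String)) (p : String × String) :
    (if ((items.foldl (fun d p => d.modify (PySem.Str.slice p.2 none (some k)) [] (· ++ [p.1]))
            (PySem.Dict.empty : PySem.Dict String (List String))).contains
            (PySem.Str.slice p.2 (some (-k)) none)) then
        ((items.foldl (fun d p => d.modify (PySem.Str.slice p.2 none (some k)) [] (· ++ [p.1]))
            (PySem.Dict.empty : PySem.Dict String (List String))).getD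
            (PySem.Str.slice p.2 (some (-k)) none) []).foldl
          (fun adj prefix_name =>
            if p.1 ≠ prefix_name then adj.modify p.1 [] (· ++ [prefix_name]) else adj) adj
      else adj)
    = items.foldl (fun adj q =>
        if p.1 ≠ q.1 ∧ PySem.Str.slice p.2 (some (-k)) none = PySem.Str.slice q.2 none (some k)
        then adj.modify p.1 [] (· ++ [q.1]) else adj) adj := by
  have hB : items.foldl (fun adj q =>
        if p.1 ≠ q.1 ∧ PySem.Str.slice p.2 (some (-k)) none = PySem.Str.slice q.2 none (some k)
        then adj.modify p.1 [] (· ++ [q.1]) else adj) adj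
      = (items.filter (fun q =>
          (p.1 != q.1) && (PySem.Str.slice p.2 (some (-k)) none == PySem.Str.slice q.2 none (some k)))).foldl
          (fun adj q => adj.modify p.1 [] (· ++ [q.1])) adj :=
    pv_foldl_ite items _ _ (fun q => by simp [bne]) _ adj
  rw [hB]
  by_cases hc : ((items.foldl (fun d p => d.modify (PySem.Str.slice p.2 none (some k)) [] (· ++ [p.1]))
      (PySem.Dict.empty : PySem.Dict String (List String))).contains
      (PySem.Str.slice p.2 (some (-k)) none)) = true
  · rw [if_pos hc, pv_getD_prefix_lookup, List.foldl_map]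
    have hA : (items.filter (fun q =>
          PySem.Str.slice q.2 none (some k) == PySem.Str.slice p.2 (some (-k)) none)).foldl
          (fun adj (q : String × String) =>
            if p.1 ≠ q.1 then adj.modify p.1 [] (· ++ [q.1]) else adj) adj
        = ((items.filter (fun q =>
            PySem.Str.slice q.2 none (some k) == PySem.Str.slice p.2 (some (-k)) none)).filter
            (fun q => p.1 != q.1)).foldl
            (fun adj q => adj.modify p.1 [] (· ++ [q.1])) adj :=
      pv_foldl_ite _ _ _ (fun q => by simp [bne]) _ adj
    rw [hA, List.filter_filter]
    congr 1
    apply List.filter_congr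
    intro q _
    congr 1
    exact Bool.beq_comm
  · rw [if_neg hc]
    have hnil : items.filter (fun q =>
        (p.1 != q.1) && (PySem.Str.slice p.2 (some (-k)) none == PySem.Str.slice q.2 none (some k)))
        = [] := by
      apply List.filter_eq_nil_iff.2
      intro q hq hb
      exact hc ((pv_contains_prefix_lookup items k _).2
        (List.mem_map.2 ⟨q, hq, (eq_of_beq (Bool.and_elim_right hb)).symm⟩))
    rw [hnil]
    rfl

-- ===== VERDICT (by name: the statement is the Claim_ definition above) =====
theorem build_adjacency_list_spec : Claim_equal_build_adjacency_list := by
  intro record_lookup k _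
  unfold Spec_build_adjacency_list build_adjacency_list build_adjacency_list_alt
  show (List.foldl _ PySem.Dict.empty (PySem.Dict.ofList record_lookup).items).items
      = (List.foldl _ PySem.Dict.empty (PySem.Dict.ofList record_lookup).items).items
  congr 1
  apply PySem.List.foldl_congr_mem
  intro adj p _
  exact pv_step_eq (PySem.Dict.ofList record_lookup).items k adj p
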